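-- pv_equiv track=rewrite | github.com/by-student-2017/Elastic2020 | generate_matrix.py | generate_Cijk_labels
-- ===== SOURCE A (Python) =====
-- def generate_Cijk_labels(n):
--     labels = []
--     for i in range(1, n+1):
--         if i <= 6:
--             labels.append(f'C11{i}')
--         elif i <= 10:
--             labels.append(f'C12{i-6}')
--         elif i <= 14:
--             labels.append(f'C13{i-10}')
--         else:
--             labels.append(f'C14{i-14}')
--     return labels
-- ===== SOURCE B (Python) =====
-- def generate_Cijk_labels(n):
--     labels = []
--     for prefix, count in [('C11', 6), ('C12', 4), ('C13', 4)]: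
--         for j in range(1, count + 1):
--             if len(labels) >= n:
--                 return labels
--             labels.append(f'{prefix}{j}')
--     for j in range(1, n - 14 + 1):
--         labels.append(f'C14{j}')
--     return labels
-- ===== Notes on version B (the rewrite author's own statement) =====
-- stated objective: simpler
-- what changed: Replaced A's per-index if/elif ladder over range(1,n+1) with a data-driven nested loop over a table of (prefix,count) segments that stops early at length n, followed by an unbounded C14 tail loop.
import Mathlib
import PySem

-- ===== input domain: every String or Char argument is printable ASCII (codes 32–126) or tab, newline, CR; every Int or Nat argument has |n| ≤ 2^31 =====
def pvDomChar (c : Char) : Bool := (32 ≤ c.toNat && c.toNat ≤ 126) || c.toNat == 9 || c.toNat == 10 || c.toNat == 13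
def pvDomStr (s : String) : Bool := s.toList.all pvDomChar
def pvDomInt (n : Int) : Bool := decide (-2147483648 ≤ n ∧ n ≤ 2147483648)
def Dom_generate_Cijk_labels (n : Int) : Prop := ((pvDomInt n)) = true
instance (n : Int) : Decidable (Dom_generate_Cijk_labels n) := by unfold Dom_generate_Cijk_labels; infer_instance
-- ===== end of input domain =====

-- B replaces A's per-element if/elif ladder by a table of finite segments with an
-- early stop plus an unbounded C14 tail (objective: simpler decomposition, same cost).

-- ===== PORT A =====
def generate_Cijk_labels (n : Int) : List String :=
  (PySem.List.pyRange 1 (n + 1) 1).foldl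
    (fun labels i =>
      if i ≤ 6 then labels ++ ["C11" ++ PySem.Int.toStr i]
      else if i ≤ 10 then labels ++ ["C12" ++ PySem.Int.toStr (i - 6)]
      else if i ≤ 14 then labels ++ ["C13" ++ PySem.Int.toStr (i - 10)]
      else labels ++ ["C14" ++ PySem.Int.toStr (i - 14)]) []

-- ===== PORT B =====
-- inner loop over one segment: append '<pre><j>' unless the output already has n elements,
-- in which case the Bool flag becomes true, modelling Python's early 'return labels'
def pvSegFold (n : Int) (acc : List String × Bool) (seg : String × Int) : List String × Bool :=
  (PySem.List.pyRange 1 (seg.2 + 1) 1).foldl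
    (fun a j =>
      if a.2 then a
      else if (a.1.length : Int) ≥ n then (a.1, true)
      else (a.1 ++ [seg.1 ++ PySem.Int.toStr j], false)) acc

def generate_Cijk_labels_alt (n : Int) : List String :=
  match [("C11", (6 : Int)), ("C12", 4), ("C13", 4)].foldl (pvSegFold n) ([], false) with
  | (labels, true) => labels
  | (labels, false) =>
      labels ++ (PySem.List.pyRange 1 (n - 14 + 1) 1).map (fun j => "C14" ++ PySem.Int.toStr j)

-- ===== PRECONDITION & SPEC =====
def Spec_generate_Cijk_labels (n : Int) (out : List String) : Prop := out = generate_Cijk_labels_alt n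
instance (n : Int) (out : List String) : Decidable (Spec_generate_Cijk_labels n out) := by unfold Spec_generate_Cijk_labels; infer_instance

-- ===== CLAIM (what is proved, stated in full; the proofs are below) =====
def Claim_equal_generate_Cijk_labels : Prop := ∀ (n : Int), Dom_generate_Cijk_labels n → Spec_generate_Cijk_labels n (generate_Cijk_labels n)

-- ===== LEMMAS AND PROOFS =====

-- the 14-label prefix both programs produce once n ≥ 14
def pvPrefix14 : List String :=
  ["C111","C112","C113","C114","C115","C116","C121","C122","C123","C124","C131","C132","C133","C134"]

-- the label A's if/elif ladder assigns to index i
def pvLabelA (i : Int) : String :=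
  if i ≤ 6 then "C11" ++ PySem.Int.toStr i
  else if i ≤ 10 then "C12" ++ PySem.Int.toStr (i - 6)
  else if i ≤ 14 then "C13" ++ PySem.Int.toStr (i - 10)
  else "C14" ++ PySem.Int.toStr (i - 14)

lemma A_eq_map (n : Int) :
    generate_Cijk_labels n = (PySem.List.pyRange 1 (n + 1) 1).map pvLabelA := by
  unfold generate_Cijk_labels
  have hcg : (PySem.List.pyRange 1 (n + 1) 1).foldl
      (fun labels i =>
        if i ≤ 6 then labels ++ ["C11" ++ PySem.Int.toStr i]
        else if i ≤ 10 then labels ++ ["C12" ++ PySem.Int.toStr (i - 6)]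
        else if i ≤ 14 then labels ++ ["C13" ++ PySem.Int.toStr (i - 10)]
        else labels ++ ["C14" ++ PySem.Int.toStr (i - 14)]) [] =
      (PySem.List.pyRange 1 (n + 1) 1).foldl (fun labels i => labels ++ [pvLabelA i]) [] := by
    apply PySem.List.foldl_congr_mem
    intro acc x _
    unfold pvLabelA
    split_ifs <;> rfl
  have hm : (PySem.List.pyRange 1 (n + 1) 1).foldl (fun labels i => labels ++ [pvLabelA i]) [] =
      [] ++ (PySem.List.pyRange 1 (n + 1) 1).map pvLabelA := by
    apply PySem.List.foldl_append_singleton_eq_map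
  rw [hcg, hm]
  simp

lemma pyRange_map_shift (k : Int) : ∀ (m : Nat) (a : Int),
    (PySem.List.pyRange a (a + (m : Int)) 1).map (fun i => i - k) =
      PySem.List.pyRange (a - k) (a - k + (m : Int)) 1 := by
  intro m
  induction m with
  | zero =>
    intro a
    rw [PySem.List.pyRange_one_eq_nil (by omega), PySem.List.pyRange_one_eq_nil (by omega)]
    simp
  | succ m ih =>
    intro a
    have e1 : a + ((m + 1 : Nat) : Int) = (a + 1) + (m : Int) := by push_cast; ring
    have e2 : (a - k) + ((m + 1 : Nat) : Int) = ((a + 1) - k) + (m : Int) := by push_cast; ring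
    rw [e1, e2, PySem.List.pyRange_one_cons (by omega),
      PySem.List.pyRange_one_cons (show a - k < (a + 1) - k + (m : Int) by omega)]
    simp only [List.map_cons]
    rw [ih (a + 1), show a - k + 1 = a + 1 - k from by ring]

lemma pvSegFold_stop (n : Int) (L : List String) (seg : String × Int) :
    pvSegFold n (L, true) seg = (L, true) := by
  unfold pvSegFold
  exact List.foldl_fixed' (fun j => by simp) _

lemma inner_no_stop (n : Int) (pre : String) : ∀ (c : Nat) (L : List String),
    (L.length : Int) + (c : Int) ≤ n →
    pvSegFold n (L, false) (pre, (c : Int)) =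
      (L ++ (PySem.List.pyRange 1 ((c : Int) + 1) 1).map (fun j => pre ++ PySem.Int.toStr j),
        false) := by
  intro c
  induction c with
  | zero =>
    intro L h
    unfold pvSegFold
    rw [show (((0 : Nat) : Int) + 1) = 1 from by norm_num, PySem.List.pyRange_one_eq_nil le_rfl]
    simp
  | succ c ih =>
    intro L h
    unfold pvSegFold
    rw [show (((c + 1 : Nat)) : Int) + 1 = ((c : Int) + 1) + 1 from by push_cast; ring,
      PySem.List.pyRange_one_succ_right (by omega), List.foldl_append]
    have hrec := ih L (by push_cast at h ⊢; omega)
    unfold pvSegFold at hrec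
    rw [hrec]
    simp only [List.foldl_cons, List.foldl_nil]
    rw [if_neg (by simp), if_neg (by
      simp only [List.length_append, List.length_map, PySem.List.length_pyRange_one]
      push_cast at h ⊢
      omega)]
    simp [List.append_assoc]

lemma A_le_zero (n : Int) (h : n ≤ 0) : generate_Cijk_labels n = [] := by
  unfold generate_Cijk_labels
  rw [PySem.List.pyRange_one_eq_nil (by omega)]
  rfl

lemma B_le_zero (n : Int) (h : n ≤ 0) : generate_Cijk_labels_alt n = [] := by
  unfold generate_Cijk_labels_alt
  have s0 : pvSegFold n ([], false) ("C11", 6) = ([], true) := by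
    unfold pvSegFold
    rw [show PySem.List.pyRange 1 (6 + 1) 1 = [1, 2, 3, 4, 5, 6] from by decide]
    simp [h]
  simp only [List.foldl_cons, List.foldl_nil]
  rw [s0, pvSegFold_stop, pvSegFold_stop]

lemma segfold_all (n : Int) (h : 14 ≤ n) :
    [("C11", (6 : Int)), ("C12", 4), ("C13", 4)].foldl (pvSegFold n) ([], false) =
      (pvPrefix14, false) := by
  have s1 : pvSegFold n ([], false) ("C11", 6) =
      (["C111", "C112", "C113", "C114", "C115", "C116"], false) := by
    have := inner_no_stop n "C11" 6 [] (by simp; omega)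
    simp only [Nat.cast_ofNat] at this
    rw [this]
    decide
  have s2 : pvSegFold n (["C111", "C112", "C113", "C114", "C115", "C116"], false) ("C12", 4) =
      (["C111", "C112", "C113", "C114", "C115", "C116", "C121", "C122", "C123", "C124"],
        false) := by
    have := inner_no_stop n "C12" 4 ["C111", "C112", "C113", "C114", "C115", "C116"]
      (by simp; omega)
    simp only [Nat.cast_ofNat] at this
    rw [this]
    decide
  have s3 : pvSegFold n
      (["C111", "C112", "C113", "C114", "C115", "C116", "C121", "C122", "C123", "C124"], false)
      ("C13", 4) = (pvPrefix14, false) := by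
    have := inner_no_stop n "C13" 4
      ["C111", "C112", "C113", "C114", "C115", "C116", "C121", "C122", "C123", "C124"]
      (by simp; omega)
    simp only [Nat.cast_ofNat] at this
    rw [this]
    decide
  simp only [List.foldl_cons, List.foldl_nil]
  rw [s1, s2, s3]

lemma A_big (n : Int) (h : 14 ≤ n) :
    generate_Cijk_labels n =
      pvPrefix14 ++ (PySem.List.pyRange 1 (n - 14 + 1) 1).map
        (fun j => "C14" ++ PySem.Int.toStr j) := by
  rw [A_eq_map,
    PySem.List.pyRange_one_append (a := 1) (m := 15) (b := n + 1) (by omega) (by omega),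
    List.map_append]
  have hpref : (PySem.List.pyRange 1 15 1).map pvLabelA = pvPrefix14 := by decide
  have hshift := pyRange_map_shift 14 (n - 14).toNat 15
  rw [show (15 : Int) + ((n - 14).toNat : Int) = n + 1 from by omega,
    show (15 : Int) - 14 = 1 from by norm_num,
    show (1 : Int) + ((n - 14).toNat : Int) = n - 14 + 1 from by omega] at hshift
  have htail : (PySem.List.pyRange 15 (n + 1) 1).map pvLabelA =
      (PySem.List.pyRange 1 (n - 14 + 1) 1).map (fun j => "C14" ++ PySem.Int.toStr j) := by
    rw [← hshift, List.map_map]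
    apply List.map_congr_left
    intro i hi
    rw [PySem.List.mem_pyRange_one] at hi
    unfold pvLabelA
    simp only [Function.comp_apply]
    rw [if_neg (by omega), if_neg (by omega), if_neg (by omega)]
  rw [hpref, htail]

lemma B_big (n : Int) (h : 14 ≤ n) :
    generate_Cijk_labels_alt n =
      pvPrefix14 ++ (PySem.List.pyRange 1 (n - 14 + 1) 1).map
        (fun j => "C14" ++ PySem.Int.toStr j) := by
  unfold generate_Cijk_labels_alt
  rw [segfold_all n h]

lemma small_cases (n : Int) (h0 : 0 < n) (h14 : n < 14) :
    generate_Cijk_labels n = generate_Cijk_labels_alt n := by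
  interval_cases n <;> decide

-- ===== VERDICT (by name: the statement is the Claim_ definition above) =====
theorem generate_Cijk_labels_spec : Claim_equal_generate_Cijk_labels := by
  intro n _
  unfold Spec_generate_Cijk_labels
  by_cases h : n ≤ 0
  · rw [A_le_zero n h, B_le_zero n h]
  · by_cases h14 : n < 14
    · exact small_cases n (by omega) h14
    · rw [A_big n (by omega), B_big n (by omega)]
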